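-- pv_equiv track=rewrite | github.com/GeorgJohn/adventofcode | 2021/day16/georg/packet_decoder.py | parse
-- ===== SOURCE A (Python) =====
-- def parse(puzzle_input):
--     """ Parse text input in and decode from hex to binary """
--     # The file can only contain one line.
--     # If not only the last line will be decode
--     data = None
--     for line in puzzle_input.split('\n'):
--         if len(line) > 0:
--             size = len(line) * 4
--             seq = int(line, 16)
--             seq = '{0:b}'.format(seq)
--             seq = ('0' * (size - len(seq))) + seq
--             data = seq
--     return data
-- ===== SOURCE B (Python) =====
-- _NIBBLE = {
--     '0': '0000', '1': '0001', '2': '0010', '3': '0011',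
--     '4': '0100', '5': '0101', '6': '0110', '7': '0111',
--     '8': '1000', '9': '1001', 'a': '1010', 'b': '1011',
--     'c': '1100', 'd': '1101', 'e': '1110', 'f': '1111',
--     'A': '1010', 'B': '1011', 'C': '1100', 'D': '1101',
--     'E': '1110', 'F': '1111',
-- }
--
--
-- def parse(puzzle_input):
--     """ Parse text input and decode the last non-empty line from hex to binary,
--     one 4-bit group per hex digit (no big-integer conversion). """
--     data = None
--     for line in puzzle_input.split('\n'):
--         if line:
--             data = ''.join(_NIBBLE[c] for c in line)
--     return data
-- ===== Notes on version B (the rewrite author's own statement) =====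
-- stated objective: idiomatic
-- what changed: Replaces the big-integer int(line,16) -> binary-format -> manual zero-padding pipeline with a per-character hex-digit-to-4-bit-string table joined over the line, which yields the 4*len zero-padded binary string directly.
-- outside the precondition, e.g. on parse('+5'): A returns '00000101', B raises KeyError; on parse(' f'): A returns '00001111', B raises KeyError; on parse('-1'): A returns '000000-1', B raises KeyError
import Mathlib
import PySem

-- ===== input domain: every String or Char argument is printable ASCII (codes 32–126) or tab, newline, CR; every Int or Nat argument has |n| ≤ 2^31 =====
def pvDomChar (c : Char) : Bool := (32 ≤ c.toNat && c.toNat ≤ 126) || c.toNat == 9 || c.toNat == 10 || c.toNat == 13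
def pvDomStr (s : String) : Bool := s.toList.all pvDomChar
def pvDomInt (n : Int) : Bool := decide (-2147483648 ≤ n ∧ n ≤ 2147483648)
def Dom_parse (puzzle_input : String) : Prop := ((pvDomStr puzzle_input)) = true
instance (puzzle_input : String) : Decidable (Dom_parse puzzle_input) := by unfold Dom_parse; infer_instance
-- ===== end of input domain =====

-- B replaces A's big-integer base-conversion-and-zero-pad pipeline by a per-hex-digit
-- 4-bit-table expansion joined over the line (objective: idiomatic per-digit decoding).

-- ===== PORT A =====
-- int(line, 16), hand-ported: exact on the plain strings of hex digits that Pre_parse admits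
-- (none = ValueError). Python's int additionally tolerates surrounding whitespace, a sign,
-- an '0x' prefix and underscores; such lines lie outside Pre_parse (see the comment there).
def pvHexDigitVal? (c : Char) : Option Nat :=
  if '0' ≤ c && c ≤ '9' then some (c.toNat - 48)
  else if 'a' ≤ c && c ≤ 'f' then some (c.toNat - 87)
  else if 'A' ≤ c && c ≤ 'F' then some (c.toNat - 55)
  else none

def pvHexGo : List Char → Nat → Option Nat
  | [], acc => some acc
  | c :: cs, acc =>
    match pvHexDigitVal? c with
    | none => none
    | some v => pvHexGo cs (16 * acc + v)

def pvIntBase16? (cs : List Char) : Option Nat :=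
  match cs with
  | [] => none
  | _ => pvHexGo cs 0

-- A's loop over the lines; `none` inside a non-empty line models the ValueError from int(line, 16)
def parseLoopA : List (List Char) → Option (List Char) → Option (List Char)
  | [], data => data
  | line :: rest, data =>
    if 0 < line.length then
      match pvIntBase16? line with
      | none => none
      | some n =>
        let size : Int := (line.length : Int) * 4            -- size = len(line) * 4
        let seq := PySem.Int.toBinChars (n : Int)            -- binary format of seq
        let seq' := List.replicate (size - (seq.length : Int)).toNat '0' ++ seq
        parseLoopA rest (some seq')
    else parseLoopA rest data

def parse (puzzle_input : String) : Option String :=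
  (parseLoopA (PySem.Chars.splitOn puzzle_input.toList ['\n']) none).map String.ofList

-- ===== PORT B =====
-- the _NIBBLE table; `none` = KeyError
def pvNibble? (c : Char) : Option (List Char) :=
  match c with
  | '0' => some ['0','0','0','0'] | '1' => some ['0','0','0','1']
  | '2' => some ['0','0','1','0'] | '3' => some ['0','0','1','1']
  | '4' => some ['0','1','0','0'] | '5' => some ['0','1','0','1']
  | '6' => some ['0','1','1','0'] | '7' => some ['0','1','1','1']
  | '8' => some ['1','0','0','0'] | '9' => some ['1','0','0','1']
  | 'a' => some ['1','0','1','0'] | 'b' => some ['1','0','1','1']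
  | 'c' => some ['1','1','0','0'] | 'd' => some ['1','1','0','1']
  | 'e' => some ['1','1','1','0'] | 'f' => some ['1','1','1','1']
  | 'A' => some ['1','0','1','0'] | 'B' => some ['1','0','1','1']
  | 'C' => some ['1','1','0','0'] | 'D' => some ['1','1','0','1']
  | 'E' => some ['1','1','1','0'] | 'F' => some ['1','1','1','1']
  | _ => none

-- ''.join(_NIBBLE[c] for c in line)
def pvExpand : List Char → Option (List Char)
  | [] => some []
  | c :: cs =>
    match pvNibble? c, pvExpand cs with
    | some nb, some rest => some (nb ++ rest)
    | _, _ => none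

def parseLoopB : List (List Char) → Option (List Char) → Option (List Char)
  | [], data => data
  | line :: rest, data =>
    if 0 < line.length then
      match pvExpand line with
      | none => none
      | some s => parseLoopB rest (some s)
    else parseLoopB rest data

def parse_alt (puzzle_input : String) : Option String :=
  (parseLoopB (PySem.Chars.splitOn puzzle_input.toList ['\n']) none).map String.ofList

-- ===== PRECONDITION & SPEC =====
def pvHexChars : List Char :=
  ['0','1','2','3','4','5','6','7','8','9','a','b','c','d','e','f',
   'A','B','C','D','E','F']

def pvIsHex (c : Char) : Bool := pvHexChars.contains c

-- Pre_parse: every line of the input consists of plain hex digits only. Excluded are (a) inputs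
-- where int(line, 16) raises ValueError, i.e. A raises, and (b) inputs int tolerates but a
-- per-digit table does not — surrounding whitespace, signs, hex prefixes, underscores —
-- where A still returns a value while B raises KeyError (examples in claim.json "cites").
def Pre_parse (puzzle_input : String) : Prop :=
  (PySem.Chars.splitOn puzzle_input.toList ['\n']).all (fun l => l.all pvIsHex) = true
instance (puzzle_input : String) : Decidable (Pre_parse puzzle_input) := by
  unfold Pre_parse; infer_instance

def pvWitness_parse : String := "D2FE28"

def Spec_parse (puzzle_input : String) (out : Option String) : Prop := out = parse_alt puzzle_input
instance (puzzle_input : String) (out : Option String) : Decidable (Spec_parse puzzle_input out) := by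
  unfold Spec_parse; infer_instance

-- ===== CLAIM (what is proved, stated in full; the proofs are below) =====
def Claim_equal_parse : Prop := ∀ (puzzle_input : String), Dom_parse puzzle_input → Pre_parse puzzle_input → Spec_parse puzzle_input (parse puzzle_input)

-- ===== LEMMAS AND PROOFS =====

-- proof-side total versions: the value of one hex digit, the accumulator fold, fixed-width binary
def pvVal (c : Char) : Nat := (pvHexDigitVal? c).getD 0

def pvAcc : List Char → Nat → Nat
  | [], a => a
  | c :: cs, a => pvAcc cs (16 * a + pvVal c)

def pvNib (c : Char) : List Char := (pvNibble? c).getD []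

-- k-bit big-endian binary representation of n (mod 2^k)
def pvBinK : Nat → Nat → List Char
  | 0, _ => []
  | k+1, n => pvBinK k (n / 2) ++ [Nat.digitChar (n % 2)]

-- per-character facts, by enumeration of the 22 hex digits
set_option maxRecDepth 4096 in
theorem pvChar_facts (c : Char) (h : pvIsHex c = true) :
    pvHexDigitVal? c = some (pvVal c) ∧ pvNibble? c = some (pvBinK 4 (pvVal c)) ∧ pvVal c < 16 := by
  have h' : c ∈ pvHexChars := by
    simpa [pvIsHex] using h
  fin_cases h' <;> decide

theorem pvHexGo_eq (cs : List Char) : ∀ a, cs.all pvIsHex = true → pvHexGo cs a = some (pvAcc cs a) := by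
  induction cs with
  | nil => intro a _; rfl
  | cons c cs ih =>
    intro a h
    simp only [List.all_cons, Bool.and_eq_true] at h
    show (match pvHexDigitVal? c with
          | none => none
          | some v => pvHexGo cs (16 * a + v)) = some (pvAcc cs (16 * a + pvVal c))
    rw [(pvChar_facts c h.1).1]
    exact ih _ h.2

theorem pvExpand_eq (cs : List Char) (h : cs.all pvIsHex = true) :
    pvExpand cs = some (cs.flatMap pvNib) := by
  induction cs with
  | nil => rfl
  | cons c cs ih =>
    simp only [List.all_cons, Bool.and_eq_true] at h
    simp only [pvExpand, ih h.2, List.flatMap_cons, pvNib,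
      (pvChar_facts c h.1).2.1, Option.getD_some]

theorem pvAcc_append (cs ds : List Char) (a : Nat) : pvAcc (cs ++ ds) a = pvAcc ds (pvAcc cs a) := by
  induction cs generalizing a with
  | nil => rfl
  | cons c cs ih => simp [pvAcc, ih]

theorem pvAcc_lt (cs : List Char) (h : cs.all pvIsHex = true) : pvAcc cs 0 < 16 ^ cs.length := by
  induction cs using List.reverseRecOn with
  | nil => simp [pvAcc]
  | append_singleton cs c ih =>
    simp only [List.all_append, List.all_cons, List.all_nil, Bool.and_eq_true] at h
    have hv := (pvChar_facts c h.2.1).2.2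
    have hx := ih h.1
    rw [pvAcc_append]
    simp only [pvAcc, List.length_append, List.length_cons, List.length_nil]
    calc 16 * pvAcc cs 0 + pvVal c < 16 * (pvAcc cs 0 + 1) := by omega
    _ ≤ 16 * 16 ^ cs.length := by omega
    _ = 16 ^ (cs.length + (0 + 1)) := by ring

-- splitting a fixed-width binary representation
theorem pvBinK_split (b a x : Nat) : ∀ y, y < 2 ^ b →
    pvBinK (a + b) (x * 2 ^ b + y) = pvBinK a x ++ pvBinK b y := by
  induction b with
  | zero => intro y hy; interval_cases y; simp [pvBinK]
  | succ b ih =>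
    intro y hy
    have he : 0 < 2 ^ b := pow_pos (by omega) b
    have hb1 : 2 ^ (b + 1) = 2 * 2 ^ b := by ring
    have hm : x * 2 ^ (b + 1) + y = 2 * (x * 2 ^ b) + y := by ring
    have h1 : (x * 2 ^ (b + 1) + y) / 2 = x * 2 ^ b + y / 2 := by omega
    have h2 : (x * 2 ^ (b + 1) + y) % 2 = y % 2 := by omega
    have h3 : y / 2 < 2 ^ b := by omega
    show pvBinK (a + b + 1) (x * 2 ^ (b + 1) + y) = _
    simp only [pvBinK, h1, h2, ih (y / 2) h3]
    simp

theorem pvBinK_zero (k : Nat) : pvBinK k 0 = List.replicate k '0' := by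
  induction k with
  | zero => rfl
  | succ k ih => simp [pvBinK, ih, List.replicate_succ']; rfl

-- fuel irrelevance for Nat.toDigitsCore at base 2
theorem pvCore (n : Nat) : ∀ fuel acc, n < fuel →
    Nat.toDigitsCore 2 fuel n acc = Nat.toDigitsCore 2 (n + 1) n [] ++ acc := by
  induction n using Nat.strong_induction_on with
  | _ n ih =>
    intro fuel acc h
    match fuel, h with
    | f + 1, _ =>
      rw [Nat.toDigitsCore, Nat.toDigitsCore]
      by_cases h2 : n / 2 = 0
      · simp [h2]
      · simp only [h2, if_false]
        have hlt : n / 2 < n := Nat.div_lt_self (by omega) (by omega)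
        rw [ih (n / 2) hlt f _ (by omega), ih (n / 2) hlt n _ (by omega)]
        simp

theorem pvToDigits_step (n : Nat) (h : 2 ≤ n) :
    Nat.toDigits 2 n = Nat.toDigits 2 (n / 2) ++ [Nat.digitChar (n % 2)] := by
  have h2 : n / 2 ≠ 0 := by omega
  rw [Nat.toDigits, Nat.toDigitsCore]
  simp only [h2, if_false]
  rw [pvCore (n / 2) n _ (by omega)]
  rfl

-- zero-padding Python's '{0:b}' to k bits gives the k-bit representation
theorem pvPad (k : Nat) : ∀ n, n < 2 ^ k → 0 < k →
    List.replicate (k - (Nat.toDigits 2 n).length) '0' ++ Nat.toDigits 2 n = pvBinK k n := by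
  induction k with
  | zero => omega
  | succ k ih =>
    intro n hn _
    by_cases hk : k = 0
    · subst hk
      interval_cases n <;> decide
    · by_cases h2 : 2 ≤ n
      · rw [pvToDigits_step n h2]
        have hd : n / 2 < 2 ^ k := by
          have : 2 ^ (k + 1) = 2 * 2 ^ k := by ring
          omega
        show _ = pvBinK (k + 1) n
        simp only [pvBinK]
        rw [← ih (n / 2) hd (by omega)]
        simp only [List.length_append, List.length_cons, List.length_nil]
        have : k + 1 - ((Nat.toDigits 2 (n / 2)).length + (0 + 1)) = k - (Nat.toDigits 2 (n / 2)).length := by omega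
        rw [this, List.append_assoc]
      · interval_cases n
        · have h0 : Nat.toDigits 2 0 = ['0'] := rfl
          rw [h0]
          have hl : k + 1 - ['0'].length = k := by simp
          rw [hl]
          show _ = pvBinK (k + 1) 0
          simp only [pvBinK, Nat.zero_div, Nat.zero_mod, pvBinK_zero]
          rfl
        · have h1 : Nat.toDigits 2 1 = ['1'] := rfl
          rw [h1]
          have hl : k + 1 - ['1'].length = k := by simp
          rw [hl]
          show _ = pvBinK (k + 1) 1
          have hd : (1 : Nat) / 2 = 0 := rfl
          simp only [pvBinK, hd, pvBinK_zero]
          rfl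

-- the k-bit representation of a hex fold is the concatenation of the nibbles
theorem pvBinK_flat (cs : List Char) (h : cs.all pvIsHex = true) :
    pvBinK (4 * cs.length) (pvAcc cs 0) = cs.flatMap pvNib := by
  induction cs using List.reverseRecOn with
  | nil => rfl
  | append_singleton cs c ih =>
    simp only [List.all_append, List.all_cons, List.all_nil, Bool.and_eq_true] at h
    have hv := (pvChar_facts c h.2.1).2.2
    rw [pvAcc_append]
    simp only [pvAcc, List.length_append, List.length_cons, List.length_nil]
    have hlen : 4 * (cs.length + (0 + 1)) = 4 * cs.length + 4 := by ring
    have hval : 16 * pvAcc cs 0 + pvVal c = pvAcc cs 0 * 2 ^ 4 + pvVal c := by ring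
    rw [hlen, hval, pvBinK_split 4 (4 * cs.length) (pvAcc cs 0) (pvVal c) (by omega), ih h.1]
    simp only [List.flatMap_append, List.flatMap_cons, List.flatMap_nil, List.append_nil, pvNib,
      (pvChar_facts c h.2.1).2.1, Option.getD_some]

-- the two loop bodies agree on a non-empty all-hex line
theorem pvLine (line : List Char) (hne : line ≠ []) (h : line.all pvIsHex = true) :
    List.replicate (((line.length : Int) * 4 - ((PySem.Int.toBinChars ((pvAcc line 0 : Nat) : Int)).length : Int)).toNat) '0'
      ++ PySem.Int.toBinChars ((pvAcc line 0 : Nat) : Int) = line.flatMap pvNib := by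
  have htb : PySem.Int.toBinChars ((pvAcc line 0 : Nat) : Int) = Nat.toDigits 2 (pvAcc line 0) := by
    simp [PySem.Int.toBinChars]
  rw [htb]
  have hlt : pvAcc line 0 < 2 ^ (4 * line.length) := by
    have : (2 : Nat) ^ (4 * line.length) = 16 ^ line.length := by
      rw [pow_mul]; norm_num
    rw [this]; exact pvAcc_lt line h
  have hpos : 0 < line.length := List.length_pos_of_ne_nil hne
  have htn : (((line.length : Int) * 4 - ((Nat.toDigits 2 (pvAcc line 0)).length : Int))).toNat
      = 4 * line.length - (Nat.toDigits 2 (pvAcc line 0)).length := by omega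
  rw [htn, pvPad (4 * line.length) (pvAcc line 0) hlt (by omega), pvBinK_flat line h]

theorem pvLoop (ls : List (List Char)) : ∀ d, ls.all (fun l => l.all pvIsHex) = true →
    parseLoopA ls d = parseLoopB ls d := by
  induction ls with
  | nil => intro d _; rfl
  | cons line rest ih =>
    intro d h
    simp only [List.all_cons, Bool.and_eq_true] at h
    by_cases hne : 0 < line.length
    · have hne' : line ≠ [] := by
        cases line with
        | nil => simp at hne
        | cons a l => simp
      obtain ⟨c, cs, rfl⟩ : ∃ c cs, line = c :: cs := by
        cases line with
        | nil => exact absurd rfl hne'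
        | cons a l => exact ⟨a, l, rfl⟩
      simp only [parseLoopA, parseLoopB, hne, if_true, pvIntBase16?,
        pvHexGo_eq (c :: cs) 0 h.1, pvExpand_eq (c :: cs) h.1]
      rw [pvLine (c :: cs) hne' h.1]
      exact ih _ h.2
    · simp only [parseLoopA, parseLoopB, hne, if_false]
      exact ih _ h.2

-- ===== VERDICT (by name: the statement is the Claim_ definition above) =====
theorem parse_spec : Claim_equal_parse := by
  intro s _ hpre
  unfold Spec_parse parse parse_alt
  rw [pvLoop _ none hpre]
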